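-- pv_equiv track=rewrite | github.com/Vinay-webDev/DailyLeetCodepy | 18.py | minimumLength
-- ===== SOURCE A (Python) =====
-- def minimumLength(s):
--     count = {}
--     for i in range(len(s)):
--         if s[i] not in count:
--             count[s[i]] = 1
--         else:
--             count[s[i]] += 1
--     length = 0
--     if len(s) < 3:
--         return len(s)
--     for c in count.values():
--         if c < 3:
--             length += c
--         else:
--             if c % 2 == 0:
--                 length += 2
--             else:
--                 length += 1
--     return length
-- ===== SOURCE B (Python) =====
-- def minimumLength(s):
--     # One pass: track distinct chars and a parity-toggled set of odd-count chars;
--     # result is 2*#distinct - #odd_count (no frequency dict, no second loop).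
--     seen = set()
--     odd = set()
--     for ch in s:
--         seen.add(ch)
--         if ch in odd:
--             odd.discard(ch)
--         else:
--             odd.add(ch)
--     return 2 * len(seen) - len(odd)
-- ===== Notes on version B (the rewrite author's own statement) =====
-- stated objective: simpler
-- what changed: Replaces the frequency dictionary plus a second branchy loop over counts (and the special len<3 early return) by a single pass maintaining a seen set and a parity-toggled odd set, returning the closed form 2*len(seen)-len(odd).
import Mathlib
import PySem

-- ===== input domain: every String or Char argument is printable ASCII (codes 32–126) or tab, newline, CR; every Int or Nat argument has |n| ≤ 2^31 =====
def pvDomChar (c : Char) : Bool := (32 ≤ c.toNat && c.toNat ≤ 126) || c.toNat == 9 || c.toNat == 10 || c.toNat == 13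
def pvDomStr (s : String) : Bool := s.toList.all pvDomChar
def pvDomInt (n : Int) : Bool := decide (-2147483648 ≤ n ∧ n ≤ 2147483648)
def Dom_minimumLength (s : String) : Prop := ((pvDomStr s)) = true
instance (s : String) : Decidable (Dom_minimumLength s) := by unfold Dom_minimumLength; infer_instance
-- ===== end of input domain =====

-- B replaces A's frequency dict + second branchy loop over counts by one pass with a seen set
-- and a parity-toggled odd set, returning 2*len(seen) - len(odd) (objective: simpler).

-- ===== PORT A =====
def minimumLength (s : String) : Int :=
  let l := s.toList
  let count :=
    (PySem.List.pyRange 0 (l.length : Int) 1).foldl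
      (fun (d : PySem.Dict Char Int) i =>
        let c := PySem.List.pyGetD l i ' '   -- s[i]; i ∈ range(len(s)), always in range
        if d.contains c = false then d.insert c 1
        else d.insert c (d.getD c 0 + 1))
      PySem.Dict.empty
  if (l.length : Int) < 3 then (l.length : Int)
  else
    (PySem.Dict.values count).foldl
      (fun length c =>
        if c < 3 then length + c
        else if PySem.Int.mod c 2 = 0 then length + 2
        else length + 1)
      0

-- ===== PORT B =====
def minimumLength_alt (s : String) : Int :=
  let p := s.toList.foldl
    (fun (p : PySem.Set Char × PySem.Set Char) ch =>
      (PySem.Set.add p.1 ch,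
       if PySem.Set.contains p.2 ch then PySem.Set.discard p.2 ch else PySem.Set.add p.2 ch))
    (PySem.Set.empty, PySem.Set.empty)
  2 * (PySem.Set.len p.1 : Int) - (PySem.Set.len p.2 : Int)

-- ===== PRECONDITION & SPEC =====
def Spec_minimumLength (s : String) (out : Int) : Prop := out = minimumLength_alt s
instance (s : String) (out : Int) : Decidable (Spec_minimumLength s out) := by unfold Spec_minimumLength; infer_instance

-- ===== CLAIM (what is proved, stated in full; the proofs are below) =====
def Claim_equal_minimumLength : Prop := ∀ (s : String), Dom_minimumLength s → Spec_minimumLength s (minimumLength s)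

-- ===== LEMMAS AND PROOFS =====

def pvG (c : Int) : Int := if c < 3 then c else if PySem.Int.mod c 2 = 0 then 2 else 1

def pvT (s : PySem.Set Char) (ch : Char) : PySem.Set Char :=
  if PySem.Set.contains s ch then PySem.Set.discard s ch else PySem.Set.add s ch

-- value of pvG at a positive count: 1 if odd, 2 if even
lemma pvG_count (n : Nat) (hn : 1 ≤ n) : pvG (n : Int) = if n % 2 = 1 then 1 else 2 := by
  unfold pvG
  rw [show PySem.Int.mod (n : Int) 2 = ((n % 2 : Nat) : Int) from by
    exact_mod_cast PySem.Int.mod_natCast n 2]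
  split_ifs <;> push_cast at * <;> omega

-- A's dict-building loop is Counter
lemma dictA (l : List Char) :
    l.foldl (fun (d : PySem.Dict Char Int) c =>
      if d.contains c = false then d.insert c 1 else d.insert c (d.getD c 0 + 1))
      PySem.Dict.empty = PySem.Dict.counter l := by
  rw [← PySem.Dict.foldl_insert_getD_add_one_eq_counter]
  apply PySem.List.foldl_congr_mem
  intro d c _
  by_cases h : d.contains c = false
  · simp [h, PySem.Dict.getD_of_not_contains d 0 h]
  · simp [h]

-- membership/nodup invariant of the parity-toggle loop
lemma toggle_spec (l : List Char) : ∀ (s : PySem.Set Char), s.Nodup →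
    (l.foldl pvT s).Nodup ∧
    ∀ x, x ∈ l.foldl pvT s ↔ ((if x ∈ s then 1 else 0) + l.count x) % 2 = 1 := by
  induction l with
  | nil =>
    intro s hs
    refine ⟨hs, fun x => ?_⟩
    by_cases h : x ∈ s <;> simp [h]
  | cons c t ih =>
    intro s hs
    have hstep : (pvT s c).Nodup := by
      unfold pvT; split_ifs with h
      · exact PySem.Set.nodup_discard s c hs
      · exact PySem.Set.nodup_add s c hs
    obtain ⟨hn, hm⟩ := ih (pvT s c) hstep
    refine ⟨by simpa using hn, fun x => ?_⟩
    rw [List.foldl_cons, hm x]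
    have hmem : x ∈ pvT s c ↔ ((x ∈ s ∧ x ≠ c) ∨ (x ∉ s ∧ x = c)) := by
      unfold pvT; split_ifs with h
      · have hc : c ∈ s := (PySem.Set.contains_iff s c).mp h
        rw [PySem.Set.mem_discard]
        constructor
        · exact fun ⟨h1, h2⟩ => Or.inl ⟨h1, h2⟩
        · rintro (⟨h1, h2⟩ | ⟨h1, h2⟩)
          · exact ⟨h1, h2⟩
          · exact absurd (h2 ▸ hc) h1
      · have hc : c ∉ s := fun hmem => h ((PySem.Set.contains_iff s c).mpr hmem)
        rw [PySem.Set.mem_add]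
        constructor
        · rintro (h1 | h1)
          · exact Or.inl ⟨h1, fun he => hc (he ▸ h1)⟩
          · exact Or.inr ⟨fun hx => hc (h1 ▸ hx), h1⟩
        · rintro (⟨h1, _⟩ | ⟨_, h1⟩)
          · exact Or.inl h1
          · exact Or.inr h1
    have hcnt : (c :: t).count x = t.count x + (if x = c then 1 else 0) := by
      rw [List.count_cons]
      congr 1
      by_cases h : x = c
      · simp [h]
      · have hb : (c == x) = false := by simp [Ne.symm h]
        simp [hb, h]
    by_cases hx : x = c <;> by_cases hxs : x ∈ s
    · rw [if_neg (by rw [hmem]; rintro (⟨_, h2⟩ | ⟨h1, _⟩); exacts [h2 hx, h1 hxs]),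
        if_pos hxs, hcnt, if_pos hx]; omega
    · rw [if_pos (hmem.mpr (Or.inr ⟨hxs, hx⟩)), if_neg hxs, hcnt, if_pos hx]; omega
    · rw [if_pos (hmem.mpr (Or.inl ⟨hxs, hx⟩)), if_pos hxs, hcnt, if_neg hx]; omega
    · rw [if_neg (by rw [hmem]; rintro (⟨h1, _⟩ | ⟨_, h2⟩); exacts [hxs h1, hx h2]),
        if_neg hxs, hcnt, if_neg hx]; omega

-- the odd set has one element per odd-count character of l
lemma odd_length (l : List Char) :
    (l.foldl pvT []).length
      = ((PySem.Set.ofList l).filter (fun x => decide (l.count x % 2 = 1))).length := by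
  obtain ⟨hn, hm⟩ := toggle_spec l [] List.nodup_nil
  apply List.Perm.length_eq
  rw [List.perm_ext_iff_of_nodup hn ((PySem.Set.nodup_ofList l).filter _)]
  intro x
  rw [hm x, List.mem_filter, PySem.Set.mem_ofList,
    if_neg (List.not_mem_nil (a := x)), decide_eq_true_eq]
  constructor
  · intro h
    have hx : x ∈ l := by
      by_contra hxl
      rw [List.count_eq_zero_of_not_mem hxl] at h
      omega
    exact ⟨hx, by omega⟩
  · intro ⟨_, h⟩; omega

-- sum of pvG over counts = 2*#distinct - #odd
lemma sum_g (l : List Char) : ∀ (ks : List Char), (∀ k ∈ ks, k ∈ l) →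
    (ks.map (fun k => pvG ((l.count k : Nat) : Int))).sum
      = 2 * (ks.length : Int) - ((ks.filter (fun x => decide (l.count x % 2 = 1))).length : Int) := by
  intro ks
  induction ks with
  | nil => simp
  | cons k t ih =>
    intro hmem
    have hk : 1 ≤ l.count k := List.count_pos_iff.mpr (hmem k (by simp))
    rw [List.map_cons, List.sum_cons, ih (fun a ha => hmem a (by simp [ha])),
      pvG_count _ hk]
    by_cases h : l.count k % 2 = 1 <;> simp [h] <;> ring

-- sum of counts over the distinct elements = length
lemma sum_counts (l : List Char) :
    ((PySem.Set.ofList l).map (fun k => l.count k)).sum = l.length := by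
  have hperm : (PySem.Set.ofList l).Perm l.dedup := by
    rw [List.perm_ext_iff_of_nodup (PySem.Set.nodup_ofList l) l.nodup_dedup]
    intro a; rw [PySem.Set.mem_ofList, List.mem_dedup]
  rw [(hperm.map _).sum_eq, ← List.sum_map_count_dedup_eq_length]

lemma pv_valsum (l : List Char) :
    ((PySem.Dict.counter l).values.foldl
      (fun length c => if c < 3 then length + c
        else if PySem.Int.mod c 2 = 0 then length + 2 else length + 1) 0)
    = 2 * ((PySem.Set.ofList l).length : Int) - (((l.foldl pvT []).length : Int)) := by
  have hv : (PySem.Dict.counter l).values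
      = (PySem.Set.ofList l).map (fun k => ((l.count k : Nat) : Int)) := by
    show ((PySem.Dict.counter l).items.map (·.2)) = _
    rw [PySem.Dict.items_counter, List.map_map]
    rfl
  rw [hv]
  have hfold : ((PySem.Set.ofList l).map (fun k => ((l.count k : Nat) : Int))).foldl
      (fun length c => if c < 3 then length + c
        else if PySem.Int.mod c 2 = 0 then length + 2 else length + 1) 0
      = 0 + (((PySem.Set.ofList l).map (fun k => ((l.count k : Nat) : Int))).map pvG).sum := by
    rw [← PySem.List.foldl_add]
    apply PySem.List.foldl_congr_mem
    intro acc c _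
    unfold pvG; split_ifs <;> ring
  rw [hfold, List.map_map, zero_add]
  rw [show ((fun c => pvG c) ∘ fun k => ((l.count k : Nat) : Int)) = fun k => pvG ((l.count k : Nat) : Int) from rfl]
  rw [sum_g l (PySem.Set.ofList l) (fun k hk => (PySem.Set.mem_ofList l k).mp hk)]
  rw [odd_length]

lemma pv_small (l : List Char) (h : l.length < 3) :
    2 * ((PySem.Set.ofList l).length : Int) - (((l.foldl pvT []).length : Int)) = (l.length : Int) := by
  rw [odd_length, ← sum_g l (PySem.Set.ofList l) (fun k hk => (PySem.Set.mem_ofList l k).mp hk)]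
  have hc : (PySem.Set.ofList l).map (fun k => pvG ((l.count k : Nat) : Int))
      = (PySem.Set.ofList l).map (fun k => ((l.count k : Nat) : Int)) := by
    apply List.map_congr_left
    intro k hk
    have h2 : l.count k ≤ l.length := List.count_le_length
    unfold pvG
    rw [if_pos (by omega)]
  rw [hc,
    show (PySem.Set.ofList l).map (fun k => ((l.count k : Nat) : Int))
        = ((PySem.Set.ofList l).map (fun k => l.count k)).map (Nat.cast) from by
      rw [List.map_map]; rfl,
    ← Nat.cast_list_sum, sum_counts]

lemma pv_main (l : List Char) :
    (if ((l.length : Int)) < 3 then ((l.length : Int))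
     else ((PySem.List.pyRange 0 (l.length : Int) 1).foldl
        (fun (d : PySem.Dict Char Int) i =>
          let c := PySem.List.pyGetD l i ' '
          if d.contains c = false then d.insert c 1 else d.insert c (d.getD c 0 + 1))
        PySem.Dict.empty).values.foldl
        (fun length c => if c < 3 then length + c
          else if PySem.Int.mod c 2 = 0 then length + 2 else length + 1) 0)
    = 2 * ((PySem.Set.ofList l).length : Int) - (((l.foldl pvT []).length : Int)) := by
  have hA : (PySem.List.pyRange 0 (l.length : Int) 1).foldl
      (fun (d : PySem.Dict Char Int) i =>
        let c := PySem.List.pyGetD l i ' '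
        if d.contains c = false then d.insert c 1 else d.insert c (d.getD c 0 + 1))
      PySem.Dict.empty
      = l.foldl (fun (d : PySem.Dict Char Int) c =>
          if d.contains c = false then d.insert c 1 else d.insert c (d.getD c 0 + 1))
        PySem.Dict.empty := by
    have hfm := List.foldl_map (f := fun i => PySem.List.pyGetD l i ' ')
      (g := fun (d : PySem.Dict Char Int) c =>
        if d.contains c = false then d.insert c 1 else d.insert c (d.getD c 0 + 1))
      (l := PySem.List.pyRange 0 (l.length : Int) 1) (init := PySem.Dict.empty)
    rw [← hfm,
      show PySem.List.pyRange 0 (l.length : Int) 1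
          = PySem.List.pyRange 0 (PySem.List.len l) from rfl,
      PySem.List.map_pyGetD_pyRange_zero]
  rw [hA, dictA, pv_valsum]
  split_ifs with h
  · exact (pv_small l (by exact_mod_cast h)).symm
  · rfl

-- ===== VERDICT (by name: the statement is the Claim_ definition above) =====
theorem minimumLength_spec : Claim_equal_minimumLength := by
  intro s _
  unfold Spec_minimumLength minimumLength minimumLength_alt
  simp only [PySem.List.foldl_prod_mk (f := fun s ch => PySem.Set.add s ch)
    (g := fun s ch => if PySem.Set.contains s ch then PySem.Set.discard s ch
      else PySem.Set.add s ch)]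
  rw [show (∀ (a b : PySem.Set Char), 2 * PySem.Set.len a - PySem.Set.len b
      = 2 * ((a.length : Nat) : Int) - ((b.length : Nat) : Int)) from fun _ _ => rfl]
  rw [show s.toList.foldl PySem.Set.add PySem.Set.empty = PySem.Set.ofList s.toList from rfl]
  rw [show (fun (s : PySem.Set Char) ch => if PySem.Set.contains s ch
      then PySem.Set.discard s ch else PySem.Set.add s ch) = pvT from rfl]
  exact pv_main s.toList
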